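-- pv_equiv track=rewrite | github.com/Aryan-Dev26/intelligent-network-analysis | src/core/real_network_capture.py | _categorize_threat
-- ===== SOURCE A (Python) =====
-- from typing import List, Dict, Any, Optional
--
-- def _categorize_threat(risk_indicators: List[str]) -> str:
--     """Categorize the type of threat based on risk indicators"""
--     if not risk_indicators:
--         return 'unknown'
--
--     # Check for specific threat patterns
--     if any('scan' in indicator for indicator in risk_indicators):
--         return 'port_scan'
--     elif any('malicious_port' in indicator for indicator in risk_indicators):
--         return 'malicious_service'
--     elif any('stealth' in indicator for indicator in risk_indicators):
--         return 'stealth_attack'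
--     elif any('oversized' in indicator for indicator in risk_indicators):
--         return 'data_exfiltration'
--     elif any('invalid' in indicator for indicator in risk_indicators):
--         return 'protocol_anomaly'
--     else:
--         return 'suspicious_activity'
-- ===== SOURCE B (Python) =====
-- _SUBS = ['scan', 'malicious_port', 'stealth', 'oversized', 'invalid']
-- _CATS = ['port_scan', 'malicious_service', 'stealth_attack',
--          'data_exfiltration', 'protocol_anomaly', 'suspicious_activity']
--
--
-- def _rank(indicator):
--     """Priority rank of one indicator: index of the first rule substring it
--     contains, or len(_SUBS) if it matches none."""
--     for i, sub in enumerate(_SUBS):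
--         if sub in indicator:
--             return i
--     return len(_SUBS)
--
--
-- def _categorize_threat(risk_indicators):
--     """Min-reduction: the answer is the category at the smallest rank over all
--     indicators (5 = no match = suspicious_activity)."""
--     if not risk_indicators:
--         return 'unknown'
--     best = len(_SUBS)
--     for indicator in risk_indicators:
--         best = min(best, _rank(indicator))
--     return _CATS[best]
-- ===== Notes on version B (the rewrite author's own statement) =====
-- stated objective: alternative
-- what changed: Replaced the if/elif chain of five any()-scans by a numeric min-reduction: each indicator is mapped once to the rank of the first rule substring it contains (5 if none) and the result is the category indexed by the minimum rank.
import Mathlib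
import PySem

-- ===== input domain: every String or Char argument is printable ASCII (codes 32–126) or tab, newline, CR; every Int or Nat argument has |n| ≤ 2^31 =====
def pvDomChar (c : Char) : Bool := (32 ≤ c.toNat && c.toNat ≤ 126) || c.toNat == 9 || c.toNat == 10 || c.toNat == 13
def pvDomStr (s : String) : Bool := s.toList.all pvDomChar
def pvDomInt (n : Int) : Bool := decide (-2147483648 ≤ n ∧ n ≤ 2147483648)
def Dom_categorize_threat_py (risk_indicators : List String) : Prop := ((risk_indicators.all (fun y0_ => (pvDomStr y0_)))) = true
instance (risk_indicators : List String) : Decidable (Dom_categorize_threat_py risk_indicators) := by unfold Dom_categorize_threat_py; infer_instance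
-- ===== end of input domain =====

-- B replaces the if/elif chain of five any() scans by a min-reduction over per-indicator priority ranks (alternative decomposition, same cost).


-- ===== PORT A =====
def categorize_threat_py (risk_indicators : List String) : String :=
  if risk_indicators = [] then "unknown"
  else if risk_indicators.any (fun ind => PySem.Str.isIn "scan" ind) then "port_scan"
  else if risk_indicators.any (fun ind => PySem.Str.isIn "malicious_port" ind) then "malicious_service"
  else if risk_indicators.any (fun ind => PySem.Str.isIn "stealth" ind) then "stealth_attack"
  else if risk_indicators.any (fun ind => PySem.Str.isIn "oversized" ind) then "data_exfiltration"
  else if risk_indicators.any (fun ind => PySem.Str.isIn "invalid" ind) then "protocol_anomaly"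
  else "suspicious_activity"

-- ===== PORT B =====
def pvSubs : List String := ["scan", "malicious_port", "stealth", "oversized", "invalid"]
def pvCats : List String :=
  ["port_scan", "malicious_service", "stealth_attack",
   "data_exfiltration", "protocol_anomaly", "suspicious_activity"]

-- '_rank': index of the first rule substring contained in the indicator, else len(_SUBS)
def pvRankAux (i : Nat) (subs : List String) (indicator : String) : Nat :=
  match subs with
  | [] => i
  | s :: rest => if PySem.Str.isIn s indicator then i else pvRankAux (i + 1) rest indicator

def pvRank (indicator : String) : Nat := pvRankAux 0 pvSubs indicator

def categorize_threat_py_alt (risk_indicators : List String) : String :=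
  if risk_indicators = [] then "unknown"
  else
    let best := risk_indicators.foldl (fun b ind => min b (pvRank ind)) pvSubs.length
    pvCats.getD best ""

-- ===== PRECONDITION & SPEC =====
def Spec_categorize_threat_py (risk_indicators : List String) (out : String) : Prop := out = categorize_threat_py_alt risk_indicators
instance (risk_indicators : List String) (out : String) : Decidable (Spec_categorize_threat_py risk_indicators out) := by unfold Spec_categorize_threat_py; infer_instance

-- ===== CLAIM (what is proved, stated in full; the proofs are below) =====
def Claim_equal_categorize_threat_py : Prop := ∀ (risk_indicators : List String), Dom_categorize_threat_py risk_indicators → Spec_categorize_threat_py risk_indicators (categorize_threat_py risk_indicators)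

-- ===== LEMMAS AND PROOFS =====

-- the min-fold is bounded by its initial value
theorem foldl_min_le_init (xs : List String) (init : Nat) :
    xs.foldl (fun b ind => min b (pvRank ind)) init ≤ init := by
  induction xs generalizing init with
  | nil => simp
  | cons x xs ih => exact le_trans (ih _) (min_le_left _ _)

-- the min-fold is bounded by the rank of any member
theorem foldl_min_le_mem : ∀ (xs : List String) (init : Nat) (ind : String), ind ∈ xs →
    xs.foldl (fun b i => min b (pvRank i)) init ≤ pvRank ind
  | x :: xs, init, ind, h => by
    simp only [List.foldl_cons]
    rcases List.mem_cons.mp h with rfl | h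
    · exact le_trans (foldl_min_le_init _ _) (min_le_right _ _)
    · exact foldl_min_le_mem xs _ ind h

-- a common lower bound of the initial value and all ranks bounds the min-fold
theorem le_foldl_min : ∀ (xs : List String) (init j : Nat), j ≤ init →
    (∀ ind ∈ xs, j ≤ pvRank ind) → j ≤ xs.foldl (fun b i => min b (pvRank i)) init
  | [], _, _, h0, _ => by simpa
  | x :: xs, init, j, h0, h => by
    simp only [List.foldl_cons]
    exact le_foldl_min xs _ j (le_min h0 (h x List.mem_cons_self))
      (fun i hi => h i (List.mem_cons_of_mem _ hi))

-- rank characterisation via the five substring tests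
theorem pvRank_eq (ind : String) :
    pvRank ind =
      if PySem.Str.isIn "scan" ind then 0
      else if PySem.Str.isIn "malicious_port" ind then 1
      else if PySem.Str.isIn "stealth" ind then 2
      else if PySem.Str.isIn "oversized" ind then 3
      else if PySem.Str.isIn "invalid" ind then 4
      else 5 := by
  simp only [pvRank, pvSubs, pvRankAux]

-- ===== VERDICT (by name: the statement is the Claim_ definition above) =====
theorem categorize_threat_py_spec : Claim_equal_categorize_threat_py := by
  intro xs _
  unfold Spec_categorize_threat_py categorize_threat_py categorize_threat_py_alt
  by_cases hnil : xs = []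
  · simp [hnil]
  simp only [if_neg hnil]
  set best := xs.foldl (fun b i => min b (pvRank i)) pvSubs.length with hbest
  by_cases h1 : xs.any (fun ind => PySem.Str.isIn "scan" ind)
  · rcases List.any_eq_true.mp h1 with ⟨i, hi, hin⟩
    have hr : pvRank i = 0 := by rw [pvRank_eq, if_pos hin]
    have hb : best = 0 := Nat.le_zero.mp (hr ▸ foldl_min_le_mem xs _ i hi)
    rw [if_pos h1, hb]; rfl
  have f1 := List.any_eq_false.mp (Bool.eq_false_iff.mpr h1)
  by_cases h2 : xs.any (fun ind => PySem.Str.isIn "malicious_port" ind)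
  · rcases List.any_eq_true.mp h2 with ⟨i, hi, hin⟩
    have hr : pvRank i = 1 := by
      rw [pvRank_eq, if_neg (f1 i hi), if_pos hin]
    have hlo : 1 ≤ best := le_foldl_min xs _ 1 (by simp [pvSubs])
      (fun j hj => by rw [pvRank_eq, if_neg (f1 j hj)]; split_ifs <;> omega)
    have hb : best = 1 := le_antisymm (hr ▸ foldl_min_le_mem xs _ i hi) hlo
    rw [if_neg h1, if_pos h2, hb]; rfl
  have f2 := List.any_eq_false.mp (Bool.eq_false_iff.mpr h2)
  by_cases h3 : xs.any (fun ind => PySem.Str.isIn "stealth" ind)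
  · rcases List.any_eq_true.mp h3 with ⟨i, hi, hin⟩
    have hr : pvRank i = 2 := by
      rw [pvRank_eq, if_neg (f1 i hi), if_neg (f2 i hi), if_pos hin]
    have hlo : 2 ≤ best := le_foldl_min xs _ 2 (by simp [pvSubs])
      (fun j hj => by
        rw [pvRank_eq, if_neg (f1 j hj), if_neg (f2 j hj)]; split_ifs <;> omega)
    have hb : best = 2 := le_antisymm (hr ▸ foldl_min_le_mem xs _ i hi) hlo
    rw [if_neg h1, if_neg h2, if_pos h3, hb]; rfl
  have f3 := List.any_eq_false.mp (Bool.eq_false_iff.mpr h3)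
  by_cases h4 : xs.any (fun ind => PySem.Str.isIn "oversized" ind)
  · rcases List.any_eq_true.mp h4 with ⟨i, hi, hin⟩
    have hr : pvRank i = 3 := by
      rw [pvRank_eq, if_neg (f1 i hi), if_neg (f2 i hi), if_neg (f3 i hi), if_pos hin]
    have hlo : 3 ≤ best := le_foldl_min xs _ 3 (by simp [pvSubs])
      (fun j hj => by
        rw [pvRank_eq, if_neg (f1 j hj), if_neg (f2 j hj), if_neg (f3 j hj)]
        split_ifs <;> omega)
    have hb : best = 3 := le_antisymm (hr ▸ foldl_min_le_mem xs _ i hi) hlo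
    rw [if_neg h1, if_neg h2, if_neg h3, if_pos h4, hb]; rfl
  have f4 := List.any_eq_false.mp (Bool.eq_false_iff.mpr h4)
  by_cases h5 : xs.any (fun ind => PySem.Str.isIn "invalid" ind)
  · rcases List.any_eq_true.mp h5 with ⟨i, hi, hin⟩
    have hr : pvRank i = 4 := by
      rw [pvRank_eq, if_neg (f1 i hi), if_neg (f2 i hi), if_neg (f3 i hi),
        if_neg (f4 i hi), if_pos hin]
    have hlo : 4 ≤ best := le_foldl_min xs _ 4 (by simp [pvSubs])
      (fun j hj => by
        rw [pvRank_eq, if_neg (f1 j hj), if_neg (f2 j hj), if_neg (f3 j hj), if_neg (f4 j hj)]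
        split_ifs <;> omega)
    have hb : best = 4 := le_antisymm (hr ▸ foldl_min_le_mem xs _ i hi) hlo
    rw [if_neg h1, if_neg h2, if_neg h3, if_neg h4, if_pos h5, hb]; rfl
  have f5 := List.any_eq_false.mp (Bool.eq_false_iff.mpr h5)
  have hlo : 5 ≤ best := le_foldl_min xs _ 5 (by simp [pvSubs])
    (fun j hj => by
      rw [pvRank_eq, if_neg (f1 j hj), if_neg (f2 j hj), if_neg (f3 j hj),
        if_neg (f4 j hj), if_neg (f5 j hj)])
  have hb : best = 5 := le_antisymm (foldl_min_le_init xs _) hlo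
  rw [if_neg h1, if_neg h2, if_neg h3, if_neg h4, if_neg h5, hb]; rfl
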